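-- pv_equiv track=rewrite | github.com/Klaudia1303/student_code_analysis | Progetto-tirocinio2024/data/student_data/2074442_Cimignolo/LabPython08/LabPython08/A_Ex1.py | A_Ex1
-- ===== SOURCE A (Python) =====
-- def A_Ex1(l):
--     car=''
--     counter=0
--     l1=[]
--     for s in l:
--         for c in set(s):
--             l1.append(c)
--     for c in l1:
--         if (c.isalpha() and c.islower()):
--             if l1.count(c)>counter:
--                 counter=l1.count(c)
--                 car=c
--             elif l1.count(c)==counter:
--                 m=l1.count(chr(max(ord(c),ord(car))))
--                 car=chr(max(ord(c),ord(car)))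
--
--
--
--     return car
-- ===== SOURCE B (Python) =====
-- def A_Ex1(l):
--     # Scan the fixed alphabet from 'z' down to 'a'; a letter's score is the number
--     # of strings that contain it (each string's set contributes each char once).
--     # A strict '>' improvement while scanning downward keeps the largest letter on
--     # ties, and '' survives when no letter occurs at all.
--     best, best_n = '', 0
--     for code in range(ord('z'), ord('a') - 1, -1):
--         c = chr(code)
--         n = sum(1 for s in l if c in s)
--         if n > best_n:
--             best, best_n = c, n
--     return best
-- ===== Notes on version B (the rewrite author's own statement) =====
-- stated objective: faster
-- what changed: Instead of materializing the per-string character sets into one stream and repeatedly rescanning it with l1.count and a tie-break branch chain, B never enumerates the data's characters at all: it scans the fixed alphabet from 'z' down to 'a', scores each letter by the number of strings containing it, and keeps the first strict improvement, which realizes the max-count/largest-letter rule by traversal order.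
import Mathlib
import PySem

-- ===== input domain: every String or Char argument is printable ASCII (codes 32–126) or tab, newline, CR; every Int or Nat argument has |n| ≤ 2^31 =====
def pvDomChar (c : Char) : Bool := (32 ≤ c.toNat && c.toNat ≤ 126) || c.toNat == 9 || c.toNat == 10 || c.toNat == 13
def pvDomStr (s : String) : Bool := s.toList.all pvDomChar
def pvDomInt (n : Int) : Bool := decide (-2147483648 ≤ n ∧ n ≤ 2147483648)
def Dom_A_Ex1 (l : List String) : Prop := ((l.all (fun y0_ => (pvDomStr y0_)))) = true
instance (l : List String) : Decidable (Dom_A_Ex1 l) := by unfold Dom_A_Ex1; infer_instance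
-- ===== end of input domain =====

-- B drops A's character stream and repeated l1.count rescans entirely: it scans the
-- fixed alphabet 'z' down to 'a', scoring each letter by how many strings contain it,
-- so the tie-break falls out of the traversal order (objective: faster).

-- ===== PORT A =====
-- c.isalpha() and c.islower() for one character
def pvP (c : Char) : Bool := PySem.Chars.isalpha c && PySem.Chars.islower c

-- ord(car): car is a one-char string whenever this is read (the first tie is always
-- preceded by a '>' branch that set car); the default for "" is never used by A.
def pvOrdCar (s : String) : Nat := (s.toList.headD (Char.ofNat 0)).toNat

-- the body of A's second loop under the isalpha/islower guard
def pvInnerA (L : List Char) (st : String × Nat) (c : Char) : String × Nat :=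
  if L.count c > st.2 then (String.ofList [c], L.count c)
  else if L.count c = st.2 then
    -- Python computes 'm = l1.count(...)' and never uses it; kept as a dead let
    let _m := L.count (Char.ofNat (max c.toNat (pvOrdCar st.1)))
    (String.ofList [Char.ofNat (max c.toNat (pvOrdCar st.1))], st.2)
  else st

def pvStepA (L : List Char) (st : String × Nat) (c : Char) : String × Nat :=
  if pvP c then pvInnerA L st c else st

def A_Ex1 (l : List String) : String :=
  let l1 : List Char := l.foldl (fun acc s => acc ++ PySem.Set.ofList s.toList) []
  (l1.foldl (pvStepA l1) ("", 0)).1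

-- ===== PORT B =====
-- body of B's loop over range(ord('z'), ord('a')-1, -1); 'c in s' for the
-- one-character string c is PySem.Str.isIn
def pvStepB (l : List String) (st : String × Int) (code : Int) : String × Int :=
  let c := Char.ofNat code.toNat
  let n : Int := l.foldl (fun acc s =>
    if PySem.Str.isIn (String.ofList [c]) s then acc + 1 else acc) 0
  if n > st.2 then (String.ofList [c], n) else st

def A_Ex1_alt (l : List String) : String :=
  ((PySem.List.pyRange 122 96 (-1)).foldl (pvStepB l) ("", 0)).1

-- ===== PRECONDITION & SPEC =====
def Spec_A_Ex1 (l : List String) (out : String) : Prop := out = A_Ex1_alt l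
instance (l : List String) (out : String) : Decidable (Spec_A_Ex1 l out) := by unfold Spec_A_Ex1; infer_instance

-- ===== CLAIM (what is proved, stated in full; the proofs are below) =====
def Claim_equal_A_Ex1 : Prop := ∀ (l : List String), Dom_A_Ex1 l → Spec_A_Ex1 l (A_Ex1 l)

-- ===== LEMMAS AND PROOFS =====

-- the character stream A builds: one copy of each distinct character per string
def pvCS (l : List String) : List Char := l.flatMap (fun s => PySem.Set.ofList s.toList)

-- combined (count, ord) key packed into one Nat (ord < 1114112)
def pvKey (L : List Char) (c : Char) : Nat := L.count c * 1114112 + c.toNat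

def pvBestStep (L : List Char) (acc : Option Char) (x : Char) : Option Char :=
  match acc with
  | none => some x
  | some m => if pvKey L m < pvKey L x then some x else some m

def pvBest (L K : List Char) : Option Char := K.foldl (pvBestStep L) none

lemma pvCharLt (c : Char) : c.toNat < 1114112 := by
  have h := c.valid
  rcases h with h | ⟨_, h⟩ <;>
    (simp only [Char.toNat] at *) <;> omega

lemma pvKey_inj (L : List Char) {a b : Char} (h : pvKey L a = pvKey L b) : a = b := by
  have ha := pvCharLt a
  have hb := pvCharLt b
  have : a.toNat = b.toNat := by unfold pvKey at h; omega
  calc a = Char.ofNat a.toNat := (Char.ofNat_toNat a).symm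
    _ = Char.ofNat b.toNat := by rw [this]
    _ = b := Char.ofNat_toNat b

-- the state relation between A's (car, counter) loop and the best-key fold
def pvRel (L : List Char) (st : String × Nat) (acc : Option Char) : Prop :=
  (st = ("", 0) ∧ acc = none) ∨ ∃ m, acc = some m ∧ st = (String.ofList [m], L.count m)

lemma pvStep_rel (L : List Char) (st : String × Nat) (acc : Option Char) (c : Char)
    (hc : c ∈ L) (h : pvRel L st acc) :
    pvRel L (pvInnerA L st c) (pvBestStep L acc c) := by
  have hcpos : 0 < L.count c := List.count_pos_iff.mpr hc
  have hbc := pvCharLt c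
  rcases h with ⟨hst, hacc⟩ | ⟨m, hacc, hst⟩
  · subst hst hacc
    right
    exact ⟨c, rfl, by simp [pvInnerA, hcpos]⟩
  · subst hst hacc
    have hbm := pvCharLt m
    have hcar : pvOrdCar (String.ofList [m]) = m.toNat := by
      simp [pvOrdCar, String.toList_ofList]
    by_cases h1 : L.count m < L.count c
    · have hk : pvKey L m < pvKey L c := by unfold pvKey; omega
      right
      refine ⟨c, ?_, ?_⟩
      · simp [pvBestStep, hk]
      · simp [pvInnerA, h1]
    · by_cases h2 : L.count c = L.count m
      · -- tie on the count: A moves car to the larger character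
        by_cases h3 : m.toNat < c.toNat
        · have hk : pvKey L m < pvKey L c := by unfold pvKey; omega
          have hmax : Char.ofNat (max c.toNat m.toNat) = c := by
            rw [Nat.max_eq_left (Nat.le_of_lt h3), Char.ofNat_toNat]
          right
          refine ⟨c, by simp [pvBestStep, hk], ?_⟩
          simp only [pvInnerA, hcar]
          rw [if_neg (by omega), if_pos h2, hmax, h2]
        · have hk : ¬ pvKey L m < pvKey L c := by unfold pvKey; omega
          have hmax : Char.ofNat (max c.toNat m.toNat) = m := by
            rw [Nat.max_eq_right (Nat.le_of_not_lt h3), Char.ofNat_toNat]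
          right
          refine ⟨m, by simp [pvBestStep, hk], ?_⟩
          simp only [pvInnerA, hcar]
          rw [if_neg (by omega), if_pos h2, hmax]
      · -- strictly smaller count: both sides keep the current best
        have hk : ¬ pvKey L m < pvKey L c := by unfold pvKey; omega
        right
        refine ⟨m, by simp [pvBestStep, hk], ?_⟩
        simp only [pvInnerA]
        rw [if_neg (by omega), if_neg h2]

lemma pvLoopA (L : List Char) (K : List Char) (hK : ∀ c ∈ K, c ∈ L)
    (st : String × Nat) (acc : Option Char) (h : pvRel L st acc) :
    pvRel L (K.foldl (pvInnerA L) st) (K.foldl (pvBestStep L) acc) := by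
  induction K generalizing st acc with
  | nil => exact h
  | cons c K ih =>
    exact ih (fun x hx => hK x (List.mem_cons_of_mem _ hx))
      _ _ (pvStep_rel L st acc c (hK c List.mem_cons_self) h)

-- A computes the best-key element of the filtered stream
lemma A_char (l : List String) :
    A_Ex1 l = (match pvBest (pvCS l) ((pvCS l).filter pvP) with
               | none => ""
               | some m => String.ofList [m]) := by
  have hL : l.foldl (fun acc s => acc ++ PySem.Set.ofList s.toList) ([] : List Char) = pvCS l := by
    simpa [pvCS] using PySem.List.foldl_append_eq_flatMap (fun s => PySem.Set.ofList s.toList) l []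
  show ((l.foldl (fun acc s => acc ++ PySem.Set.ofList s.toList) []).foldl
          (pvStepA (l.foldl (fun acc s => acc ++ PySem.Set.ofList s.toList) [])) ("", 0)).1 = _
  rw [hL]
  have hfilter : (pvCS l).foldl (pvStepA (pvCS l)) ("", 0)
      = ((pvCS l).filter pvP).foldl (pvInnerA (pvCS l)) ("", 0) := by
    have := PySem.List.foldl_if_eq_foldl_filter pvP (pvInnerA (pvCS l)) (pvCS l) ("", 0)
    simpa [pvStepA] using this
  rw [hfilter]
  have hrel := pvLoopA (pvCS l) ((pvCS l).filter pvP)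
      (fun c hc => (List.mem_filter.mp hc).1) ("", 0) none (Or.inl ⟨rfl, rfl⟩)
  rcases hrel with ⟨hst, hacc⟩ | ⟨m, hacc, hst⟩
  · rw [hst]; unfold pvBest at *; rw [hacc]
  · rw [hst]; unfold pvBest at *; rw [hacc]

-- characterisation of the best-key fold
lemma pvBest_fold_spec (L : List Char) (K : List Char) (acc : Option Char) :
    (K.foldl (pvBestStep L) acc = none ↔ (K = [] ∧ acc = none)) ∧
    (∀ m, K.foldl (pvBestStep L) acc = some m →
      (m ∈ K ∨ acc = some m) ∧ (∀ y ∈ K, pvKey L y ≤ pvKey L m) ∧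
      (∀ a, acc = some a → pvKey L a ≤ pvKey L m)) := by
  induction K generalizing acc with
  | nil =>
    constructor
    · simp
    · intro m hm
      exact ⟨Or.inr hm, by simp, fun a ha => by rw [ha] at hm; cases hm; exact Nat.le_refl _⟩
  | cons c K ih =>
    constructor
    · constructor
      · intro h
        have h2 := ((ih (pvBestStep L acc c)).1).mp h
        exfalso
        rcases acc with _ | m <;> simp [pvBestStep] at h2
        split at h2 <;> simp at h2
      · rintro ⟨h, _⟩; cases h
    · intro m hm
      have h2 := (ih (pvBestStep L acc c)).2 m hm
      obtain ⟨hmem, hmax, hacc⟩ := h2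
      rcases acc with _ | a
      · -- acc = none : step gives some c
        have hstep : pvBestStep L none c = some c := rfl
        rw [hstep] at hmem hacc
        have hcm : pvKey L c ≤ pvKey L m := hacc c rfl
        refine ⟨?_, ?_, ?_⟩
        · rcases hmem with h | h
          · exact Or.inl (List.mem_cons_of_mem _ h)
          · cases h; exact Or.inl List.mem_cons_self
        · intro y hy
          rcases List.mem_cons.mp hy with rfl | hy
          · exact hcm
          · exact hmax y hy
        · intro a ha; cases ha
      · -- acc = some a
        by_cases hk : pvKey L a < pvKey L c
        · have hstep : pvBestStep L (some a) c = some c := by simp [pvBestStep, hk]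
          rw [hstep] at hmem hacc
          have hcm : pvKey L c ≤ pvKey L m := hacc c rfl
          refine ⟨?_, ?_, ?_⟩
          · rcases hmem with h | h
            · exact Or.inl (List.mem_cons_of_mem _ h)
            · cases h; exact Or.inl List.mem_cons_self
          · intro y hy
            rcases List.mem_cons.mp hy with rfl | hy
            · exact hcm
            · exact hmax y hy
          · intro b hb; cases hb; omega
        · have hstep : pvBestStep L (some a) c = some a := by simp [pvBestStep, hk]
          rw [hstep] at hmem hacc
          have ham : pvKey L a ≤ pvKey L m := hacc a rfl
          refine ⟨?_, ?_, ?_⟩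
          · rcases hmem with h | h
            · exact Or.inl (List.mem_cons_of_mem _ h)
            · exact Or.inr h
          · intro y hy
            rcases List.mem_cons.mp hy with rfl | hy
            · omega
            · exact hmax y hy
          · intro b hb; cases hb; exact ham

lemma pvBest_none_iff (L K : List Char) : pvBest L K = none ↔ K = [] := by
  unfold pvBest
  rw [(pvBest_fold_spec L K none).1]
  simp

lemma pvBest_some_spec (L K : List Char) (m : Char) (h : pvBest L K = some m) :
    m ∈ K ∧ ∀ y ∈ K, pvKey L y ≤ pvKey L m := by
  have h2 := (pvBest_fold_spec L K none).2 m h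
  obtain ⟨hmem, hmax, _⟩ := h2
  rcases hmem with h | h
  · exact ⟨h, hmax⟩
  · cases h

-- two lists with the same members have the same best element
lemma pvBest_congr (L K K' : List Char) (hmem : ∀ c, c ∈ K ↔ c ∈ K') :
    pvBest L K = pvBest L K' := by
  rcases hK : pvBest L K with _ | m
  · rcases hK' : pvBest L K' with _ | m'
    · rfl
    · exfalso
      have h1 := (pvBest_none_iff L K).mp hK
      have h2 := (pvBest_some_spec L K' m' hK').1
      rw [← hmem] at h2
      rw [h1] at h2
      cases h2
  · rcases hK' : pvBest L K' with _ | m'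
    · exfalso
      have h1 := (pvBest_none_iff L K').mp hK'
      have h2 := (pvBest_some_spec L K m hK).1
      rw [hmem, h1] at h2
      cases h2
    · obtain ⟨hm, hmax⟩ := pvBest_some_spec L K m hK
      obtain ⟨hm', hmax'⟩ := pvBest_some_spec L K' m' hK'
      have h1 : pvKey L m ≤ pvKey L m' := hmax' m ((hmem m).mp hm)
      have h2 : pvKey L m' ≤ pvKey L m := hmax m' ((hmem m').mpr hm')
      rw [pvKey_inj L (Nat.le_antisymm h2 h1)]

-- 'c in s' for a one-character needle is code-point membership
lemma pvIsIn_iff (c : Char) (s : String) :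
    PySem.Str.isIn (String.ofList [c]) s = true ↔ c ∈ s.toList := by
  rw [PySem.Str.isIn_iff_infix, String.toList_ofList]
  constructor
  · rintro ⟨p, t, hpt⟩
    rw [← hpt]; simp
  · intro h
    obtain ⟨p, t, hpt⟩ := List.append_of_mem h
    exact ⟨p, t, by rw [hpt]; simp⟩

-- the count of c in A's stream is the number of strings containing c
lemma pvCount_CS (l : List String) (c : Char) :
    (pvCS l).count c
      = l.countP (PySem.Str.isIn (String.ofList [c])) := by
  induction l with
  | nil => rfl
  | cons s l ih =>
    simp only [pvCS, List.flatMap_cons, List.count_append, List.countP_cons] at *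
    rw [ih]
    by_cases hc : c ∈ s.toList
    · rw [List.count_eq_one_of_mem (PySem.Set.nodup_ofList _)
        ((PySem.Set.mem_ofList _ _).mpr hc),
        if_pos ((pvIsIn_iff c s).mpr hc)]
      omega
    · rw [List.count_eq_zero_of_not_mem (fun h => hc ((PySem.Set.mem_ofList _ _).mp h)),
        if_neg (fun h => hc ((pvIsIn_iff c s).mp h))]
      omega

-- B's inner sum is that count
lemma pvInnerB_eq (l : List String) (c : Char) :
    (l.foldl (fun acc s =>
      if PySem.Str.isIn (String.ofList [c]) s then acc + 1 else acc) (0 : Int))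
      = ((pvCS l).count c : Int) := by
  rw [PySem.List.foldl_count_if, pvCount_CS]
  omega

-- the state relation between B's (best, best_n) loop over the remaining codes D
-- and the best-key fold
def pvRelB (L : List Char) (D : List Int) (st : String × Int) (acc : Option Char) : Prop :=
  (st = ("", 0) ∧ acc = none) ∨
  ∃ m, acc = some m ∧ st = (String.ofList [m], (L.count m : Int)) ∧
    0 < L.count m ∧ ∀ d ∈ D, d < (m.toNat : Int)

lemma pvLoopB (l : List String) (D : List Int)
    (hD : ∀ d ∈ D, 96 < d ∧ d ≤ 122)
    (hP : List.Pairwise (fun a b => b < a) D)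
    (st : String × Int) (acc : Option Char) (h : pvRelB (pvCS l) D st acc) :
    pvRelB (pvCS l) [] (D.foldl (pvStepB l) st)
      (((D.map (fun d => Char.ofNat d.toNat)).filter
          (fun c => decide (0 < (pvCS l).count c))).foldl (pvBestStep (pvCS l)) acc) := by
  induction D generalizing st acc with
  | nil => exact h
  | cons d D ih =>
    obtain ⟨hd1, hd2⟩ := hD d List.mem_cons_self
    obtain ⟨hPd, hPt⟩ := List.pairwise_cons.mp hP
    have hdNat : (Char.ofNat d.toNat).toNat = d.toNat := by
      rw [Char.toNat_ofNat, if_pos (Or.inl (by omega))]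
    have hdInt : (((Char.ofNat d.toNat).toNat : Nat) : Int) = d := by
      rw [hdNat]; omega
    have hstep : ∀ st', pvStepB l st' d =
        (if ((pvCS l).count (Char.ofNat d.toNat) : Int) > st'.2
          then (String.ofList [Char.ofNat d.toNat], ((pvCS l).count (Char.ofNat d.toNat) : Int))
          else st') := by
      intro st'; simp only [pvStepB, pvInnerB_eq]
    set c := Char.ofNat d.toNat with hc
    by_cases h0 : 0 < (pvCS l).count c
    · -- c survives the filter; both sides take a step
      rw [List.map_cons, List.filter_cons, if_pos (by simpa using h0)]
      simp only [List.foldl_cons, hstep]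
      apply ih (fun x hx => hD x (List.mem_cons_of_mem _ hx)) hPt
      rcases h with ⟨hst, hacc⟩ | ⟨m, hacc, hst, hm0, hlt⟩
      · subst hst hacc
        rw [if_pos (by simpa using h0)]
        right
        exact ⟨c, rfl, rfl, h0, fun x hx => by have h1 := hPd x hx; have h2 := hdInt; omega⟩
      · subst hacc hst
        have hmc : c.toNat < m.toNat := by
          have := hlt d List.mem_cons_self
          omega
        have hkey : pvKey (pvCS l) m < pvKey (pvCS l) c ↔ (pvCS l).count m < (pvCS l).count c := by
          have h1 := pvCharLt m
          have h2 := pvCharLt c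
          unfold pvKey
          omega
        rw [hc] at hkey
        by_cases hgt : (pvCS l).count m < (pvCS l).count c
        · rw [if_pos (by simpa using hgt)]
          simp only [pvBestStep]
          rw [if_pos (hkey.mpr hgt)]
          right
          exact ⟨c, by rw [hc], rfl, h0, fun x hx => by have h1 := hPd x hx; have h2 := hdInt; omega⟩
        · rw [if_neg (by simpa using hgt)]
          simp only [pvBestStep]
          rw [if_neg (fun hk => hgt (hkey.mp hk))]
          right
          exact ⟨m, rfl, rfl, hm0, fun x hx => hlt x (List.mem_cons_of_mem _ hx)⟩
    · -- count c = 0: the filter drops c and B's strict '>' keeps the state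
      have hc0 : (pvCS l).count c = 0 := by omega
      rw [List.map_cons, List.filter_cons, if_neg (by simpa using h0)]
      simp only [List.foldl_cons, hstep, hc0]
      apply ih (fun x hx => hD x (List.mem_cons_of_mem _ hx)) hPt
      rcases h with ⟨hst, hacc⟩ | ⟨m, hacc, hst, hm0, hlt⟩
      · subst hst hacc
        rw [if_neg (by simp)]
        exact Or.inl ⟨rfl, rfl⟩
      · subst hacc hst
        rw [if_neg (by simp)]
        right
        exact ⟨m, rfl, rfl, hm0, fun x hx => hlt x (List.mem_cons_of_mem _ hx)⟩

-- B computes the best-key element of the positive-count letters, scanned z..a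
lemma B_char (l : List String) :
    A_Ex1_alt l =
      (match pvBest (pvCS l)
          (((PySem.List.pyRange 122 96 (-1)).map (fun d => Char.ofNat d.toNat)).filter
            (fun c => decide (0 < (pvCS l).count c))) with
       | none => ""
       | some m => String.ofList [m]) := by
  have hpair : List.Pairwise (fun a b => b < a) (PySem.List.pyRange 122 96 (-1)) := by
    rw [PySem.List.pyRange_neg_one, List.pairwise_map]
    exact List.pairwise_lt_range.imp (fun h => by omega)
  have hrel := pvLoopB l (PySem.List.pyRange 122 96 (-1))
      (fun d hd => PySem.List.mem_pyRange_neg_one.mp hd)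
      hpair ("", 0) none (Or.inl ⟨rfl, rfl⟩)
  show ((PySem.List.pyRange 122 96 (-1)).foldl (pvStepB l) ("", 0)).1 = _
  rcases hrel with ⟨hst, hacc⟩ | ⟨m, hacc, hst, _, _⟩
  · rw [hst]; unfold pvBest; rw [hacc]
  · rw [hst]; unfold pvBest; rw [hacc]

lemma pvLower_iff (c : Char) :
    PySem.Chars.islower c = true ↔ (97 ≤ c.toNat ∧ c.toNat ≤ 122) := by
  simp [PySem.Chars.islower, Char.le_def, UInt32.le_iff_toNat_le]

lemma pvP_iff (c : Char) : pvP c = true ↔ (97 ≤ c.toNat ∧ c.toNat ≤ 122) := by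
  constructor
  · intro h
    exact (pvLower_iff c).mp ((Bool.and_eq_true _ _).mp h).2
  · intro h
    have hl := (pvLower_iff c).mpr h
    simp [pvP, PySem.Chars.isalpha, hl]

lemma pvMemZ (c : Char) :
    c ∈ (PySem.List.pyRange 122 96 (-1)).map (fun d => Char.ofNat d.toNat)
      ↔ (97 ≤ c.toNat ∧ c.toNat ≤ 122) := by
  rw [List.mem_map]
  constructor
  · rintro ⟨d, hd, rfl⟩
    obtain ⟨h1, h2⟩ := PySem.List.mem_pyRange_neg_one.mp hd
    have : (Char.ofNat d.toNat).toNat = d.toNat := by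
      rw [Char.toNat_ofNat, if_pos (Or.inl (by omega))]
    omega
  · rintro ⟨h1, h2⟩
    refine ⟨(c.toNat : Int), PySem.List.mem_pyRange_neg_one.mpr (by omega), ?_⟩
    rw [Int.toNat_natCast, Char.ofNat_toNat]

lemma A_Ex1_spec_aux (l : List String) : A_Ex1 l = A_Ex1_alt l := by
  have hmem : ∀ c, c ∈ (pvCS l).filter pvP ↔
      c ∈ ((PySem.List.pyRange 122 96 (-1)).map (fun d => Char.ofNat d.toNat)).filter
        (fun c => decide (0 < (pvCS l).count c)) := by
    intro c
    rw [List.mem_filter, List.mem_filter]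
    constructor
    · rintro ⟨hcl, hp⟩
      exact ⟨(pvMemZ c).mpr ((pvP_iff c).mp hp),
        decide_eq_true (List.count_pos_iff.mpr hcl)⟩
    · rintro ⟨hz, hcnt⟩
      exact ⟨List.count_pos_iff.mp (of_decide_eq_true hcnt),
        (pvP_iff c).mpr ((pvMemZ c).mp hz)⟩
  rw [A_char, B_char, pvBest_congr (pvCS l) _ _ hmem]

-- ===== VERDICT (by name: the statement is the Claim_ definition above) =====
theorem A_Ex1_spec : Claim_equal_A_Ex1 := by
  intro l _
  exact A_Ex1_spec_aux l
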